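-- pv_equiv track=rewrite | github.com/Progambler227788/CP-CompetativeProgramming | 19 september/no_boxes.py | makeBoxes
-- ===== SOURCE A (Python) =====
-- def factors(number):
--     divisors = []
--     for i in range(1, int(number ** 0.5) + 1):
--         if number % i == 0:
--             divisors.append(i)
--             if i != number // i:
--                 divisors.append(number // i)
--     return sorted(divisors)
--
-- def makeBoxes(number,weights):
--     k_s = factors(number)
--     k_s = k_s[0: len(k_s) - 1]
--     maxDiff = 0
--     for k in k_s: # picking up k
--         # issue was max or min ko age m 10**9 deta tu msla huga q k mne weights ko add krna ha 10**l , l can be large after adding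
--         # so isilye main focus is to inf always
--         maximum = float('-inf')
--         minimum = float('inf')
--         for index in range(0, len(weights), k):
--             data = weights[index: index+k]
--             picked = 0
--             for i in data:
--                 picked+=i
--             maximum = max(maximum,picked)
--             minimum = min(minimum,picked)
--         maxDiff = max(maxDiff, abs(maximum - minimum))
--     return maxDiff
-- ===== SOURCE B (Python) =====
-- def makeBoxes(number, weights):
--     # prefix sums: each group's total is one subtraction instead of an inner summation loop
--     prefix = [0]
--     acc = 0
--     for w in weights:
--         acc += w
--         prefix.append(acc)
--     divisors = []
--     i = 1
--     while i * i <= number: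
--         if number % i == 0:
--             divisors.append(i)
--             if i != number // i:
--                 divisors.append(number // i)
--         i += 1
--     n = len(weights)
--     best = 0
--     for k in sorted(divisors)[:-1]:
--         hi = None
--         lo = None
--         for start in range(0, n, k):
--             s = prefix[min(start + k, n)] - prefix[start]
--             hi = max(hi, s) if hi is not None else s
--             lo = min(lo, s) if lo is not None else s
--         if hi is not None:
--             best = max(best, hi - lo)
--     return best
-- ===== Notes on version B (the rewrite author's own statement) =====
-- stated objective: alternative
-- what changed: B builds a prefix-sum array once so every consecutive-group sum is a single subtraction instead of A's inner summation loop over a fresh slice, and tracks per-k extrema with None sentinels instead of float infinities; Pre_ excludes negative number (A raises TypeError) and number>=2 with empty weights (A returns float('inf'), not an int).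
-- outside the precondition, e.g. on makeBoxes(6, []): A returns inf, B returns 0; on makeBoxes(-4, [1, 2, 3]): A raises TypeError, B returns 0
import Mathlib
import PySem

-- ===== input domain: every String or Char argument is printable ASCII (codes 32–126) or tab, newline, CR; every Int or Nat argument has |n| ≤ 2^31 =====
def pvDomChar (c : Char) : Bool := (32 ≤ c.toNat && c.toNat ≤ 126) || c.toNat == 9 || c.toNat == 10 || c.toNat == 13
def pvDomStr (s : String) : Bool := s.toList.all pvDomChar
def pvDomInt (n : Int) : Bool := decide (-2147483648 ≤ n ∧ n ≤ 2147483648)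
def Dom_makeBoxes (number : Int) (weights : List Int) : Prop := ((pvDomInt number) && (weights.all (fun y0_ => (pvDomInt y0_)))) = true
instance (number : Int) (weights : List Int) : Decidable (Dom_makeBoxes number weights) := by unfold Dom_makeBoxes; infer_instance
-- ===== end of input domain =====

-- B replaces A's per-group slice-and-sum inner loop by a prefix-sum array (each group total is one
-- subtraction) and tracks extrema with Option instead of float infinities; equality of the RETURN
-- value is proved on Pre_ below.

-- ===== PORT A =====
-- int(number ** 0.5) is ported as Nat.sqrt number.toNat: exact for 0 ≤ number ≤ 2^31 (the Python
-- float sqrt is exact there, checked against CPython); for number < 0 Python raises TypeError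
-- (excluded by Pre_makeBoxes).
def factors (number : Int) : List Int :=
  let divisors : List Int :=
    (PySem.List.pyRange 1 ((number.toNat.sqrt : Int) + 1) 1).foldl
      (fun divisors i =>
        if PySem.Int.mod number i = 0 then
          let divisors := divisors ++ [i]
          if i ≠ PySem.Int.floordiv number i then divisors ++ [PySem.Int.floordiv number i]
          else divisors
        else divisors) []
  PySem.List.sorted divisors (fun x => x) false

-- A's float('-inf')/float('inf') extrema are modeled as Option Int (none = still infinite); the
-- final state (none, none) occurs exactly when weights = [], where Python A returns float('inf'),
-- not an int — excluded by Pre_makeBoxes.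
def makeBoxes (number : Int) (weights : List Int) : Int :=
  let k_s := factors number
  let k_s := PySem.List.slice k_s (some 0) (some ((k_s.length : Int) - 1))
  k_s.foldl
    (fun maxDiff k =>
      let mm :=
        (PySem.List.pyRange 0 (weights.length : Int) k).foldl
          (fun mm index =>
            let data := PySem.List.slice weights (some index) (some (index + k))
            let picked := data.foldl (fun picked i => picked + i) 0
            (some (match mm.1 with | none => picked | some maximum => max maximum picked),
             some (match mm.2 with | none => picked | some minimum => min minimum picked)))
          ((none : Option Int), (none : Option Int))
      match mm with
      | (some maximum, some minimum) => max maxDiff |maximum - minimum|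
      | _ => maxDiff)
    0

-- ===== PORT B =====
-- Python B's `while i * i <= number` loop as structural recursion on a fuel argument; the caller
-- passes fuel number.toNat + 1 ≥ the number of iterations, so the fuel never runs out.
def bDivsAux (number : Int) : Nat → Int → List Int → List Int
  | 0, _, divisors => divisors
  | fuel + 1, i, divisors =>
    if i * i ≤ number then
      bDivsAux number fuel (i + 1)
        (if PySem.Int.mod number i = 0 then
           (if i ≠ PySem.Int.floordiv number i then (divisors ++ [i]) ++ [PySem.Int.floordiv number i]
            else divisors ++ [i])
         else divisors)
    else divisors

def makeBoxes_alt (number : Int) (weights : List Int) : Int :=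
  let pre := (weights.foldl (fun pa w => (pa.1 ++ [pa.2 + w], pa.2 + w)) (([0] : List Int), (0 : Int))).1
  let divisors := bDivsAux number (number.toNat + 1) 1 []
  let n : Int := (weights.length : Int)
  (PySem.List.slice (PySem.List.sorted divisors (fun x => x) false) none (some (-1))).foldl
    (fun best k =>
      let hl :=
        (PySem.List.pyRange 0 n k).foldl
          (fun hl start =>
            let s := PySem.List.pyGetD pre (min (start + k) n) 0 - PySem.List.pyGetD pre start 0
            ((match hl.1 with | some hi => some (max hi s) | none => some s),
             (match hl.2 with | some lo => some (min lo s) | none => some s)))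
          ((none : Option Int), (none : Option Int))
      match hl.1 with
      | none => best
      | some hi =>
        match hl.2 with
        | none => best
        | some lo => max best (hi - lo))
    0

-- ===== PRECONDITION & SPEC =====
-- Pre_ excludes number < 0, where A raises TypeError (int() of the complex number ** 0.5), and
-- number ≥ 2 with empty weights, where A returns float('inf'), which is not an int.
def Pre_makeBoxes (number : Int) (weights : List Int) : Prop :=
  0 ≤ number ∧ (number ≤ 1 ∨ weights ≠ [])
instance (number : Int) (weights : List Int) : Decidable (Pre_makeBoxes number weights) := by
  unfold Pre_makeBoxes; infer_instance
def pvWitness_makeBoxes : Int × List Int := (6, [3, 1, 4, 1, 5, 9])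

def Spec_makeBoxes (number : Int) (weights : List Int) (out : Int) : Prop := out = makeBoxes_alt number weights
instance (number : Int) (weights : List Int) (out : Int) : Decidable (Spec_makeBoxes number weights out) := by unfold Spec_makeBoxes; infer_instance

-- ===== CLAIM (what is proved, stated in full; the proofs are below) =====
def Claim_equal_makeBoxes : Prop := ∀ (number : Int) (weights : List Int), Dom_makeBoxes number weights → Pre_makeBoxes number weights → Spec_makeBoxes number weights (makeBoxes number weights)

-- ===== LEMMAS AND PROOFS =====

-- the (at most two) divisors contributed by one trial value i (proof-only helper)
def gdiv (number i : Int) : List Int :=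
  if PySem.Int.mod number i = 0 then
    i :: (if i ≠ PySem.Int.floordiv number i then [PySem.Int.floordiv number i] else [])
  else []

lemma sq_le_iff (number i : Int) (hi : 1 ≤ i) :
    i * i ≤ number ↔ i ≤ (number.toNat.sqrt : Int) := by
  obtain ⟨a, rfl⟩ := Int.eq_ofNat_of_zero_le (by omega : (0:Int) ≤ i)
  constructor
  · intro hc
    have hn0 : 0 ≤ number := le_trans (by positivity) hc
    have h2 : a * a ≤ number.toNat := by
      rw [Int.le_toNat hn0]
      push_cast
      exact hc
    exact_mod_cast Nat.le_sqrt.mpr h2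
  · intro hc
    have h2 : a ≤ number.toNat.sqrt := by exact_mod_cast hc
    have ha : 1 ≤ a := by exact_mod_cast hi
    have hn0 : 0 ≤ number := by
      by_contra h
      push Not at h
      have ht : number.toNat = 0 := by omega
      rw [ht, Nat.sqrt_zero] at h2
      omega
    have h3 : a * a ≤ number.toNat := Nat.le_sqrt.mp h2
    calc ((a : Int)) * a = ((a * a : Nat) : Int) := by push_cast; ring
    _ ≤ ((number.toNat : Nat) : Int) := by exact_mod_cast h3
    _ = number := Int.toNat_of_nonneg hn0

lemma divsA_eq (number : Int) :
    (PySem.List.pyRange 1 ((number.toNat.sqrt : Int) + 1) 1).foldl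
      (fun divisors i =>
        if PySem.Int.mod number i = 0 then
          let divisors := divisors ++ [i]
          if i ≠ PySem.Int.floordiv number i then divisors ++ [PySem.Int.floordiv number i]
          else divisors
        else divisors) []
    = (PySem.List.pyRange 1 ((number.toNat.sqrt : Int) + 1) 1).flatMap (gdiv number) := by
  have hstep : (fun (divisors : List Int) (i : Int) =>
        if PySem.Int.mod number i = 0 then
          let divisors := divisors ++ [i]
          if i ≠ PySem.Int.floordiv number i then divisors ++ [PySem.Int.floordiv number i]
          else divisors
        else divisors) = (fun acc i => acc ++ gdiv number i) := by
    funext acc i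
    simp only [gdiv]
    split_ifs <;> simp
  rw [hstep, PySem.List.foldl_append_eq_flatMap]
  simp

lemma bDivsAux_eq (number : Int) : ∀ (fuel : Nat) (i : Int) (divisors : List Int),
    1 ≤ i → number + 1 - i ≤ (fuel : Int) →
    bDivsAux number fuel i divisors
      = divisors ++ (PySem.List.pyRange i ((number.toNat.sqrt : Int) + 1) 1).flatMap (gdiv number) := by
  intro fuel
  induction fuel with
  | zero =>
    intro i divisors hi hf
    have hni : number < i := by simp at hf; omega
    have hs : ¬ (i ≤ (number.toNat.sqrt : Int)) := by
      intro hle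
      have := (sq_le_iff number i hi).mpr hle
      nlinarith
    rw [PySem.List.pyRange_one_eq_nil (by omega)]
    simp [bDivsAux]
  | succ fuel ih =>
    intro i divisors hi hf
    rw [bDivsAux]
    by_cases hc : i * i ≤ number
    · have hs : i ≤ (number.toNat.sqrt : Int) := (sq_le_iff number i hi).mp hc
      rw [PySem.List.pyRange_one_cons (by omega), List.flatMap_cons,
        if_pos hc, ih (i + 1) _ (by omega) (by push_cast at hf ⊢; omega)]
      simp only [gdiv]
      split_ifs <;> simp
    · have hs : ¬ (i ≤ (number.toNat.sqrt : Int)) := fun hle => hc ((sq_le_iff number i hi).mpr hle)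
      rw [PySem.List.pyRange_one_eq_nil (by omega)]
      simp [hc]

lemma mem_divs_pos (number x : Int)
    (hx : x ∈ (PySem.List.pyRange 1 ((number.toNat.sqrt : Int) + 1) 1).flatMap (gdiv number)) :
    1 ≤ x := by
  rw [List.mem_flatMap] at hx
  obtain ⟨i, hir, hxg⟩ := hx
  rw [PySem.List.mem_pyRange_one] at hir
  have hi1 : 1 ≤ i := hir.1
  have his : i ≤ (number.toNat.sqrt : Int) := by omega
  have hsq : i * i ≤ number := (sq_le_iff number i hi1).mpr his
  simp only [gdiv] at hxg
  split_ifs at hxg with h1 h2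
  · rcases List.mem_cons.mp hxg with rfl | hx2
    · exact hi1
    · simp at hx2
      subst hx2
      have : i ≤ PySem.Int.floordiv number i := (PySem.Int.le_floordiv_iff_mul_le (by omega)).mpr hsq
      omega
  · rcases List.mem_cons.mp hxg with rfl | hx2
    · exact hi1
    · simp at hx2
  · simp at hxg

-- the prefix list built by B's first loop, characterized
lemma prefix_build (ws : List Int) : ∀ (p : List Int) (a : Int),
    (ws.foldl (fun pa w => (pa.1 ++ [pa.2 + w], pa.2 + w)) (p, a)).1
      = p ++ (List.range ws.length).map (fun t => a + (ws.take (t + 1)).sum) := by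
  induction ws with
  | nil => intro p a; simp
  | cons w ws ih =>
    intro p a
    simp only [List.foldl_cons]
    rw [ih (p ++ [a + w]) (a + w)]
    simp [List.length_cons, List.range_succ_eq_map, List.map_map, Function.comp_def, add_assoc]

lemma prefix_getD (ws : List Int) (j : Nat) (hj : j ≤ ws.length) :
    ((ws.foldl (fun pa w => (pa.1 ++ [pa.2 + w], pa.2 + w)) (([0] : List Int), (0 : Int))).1).getD j 0
      = (ws.take j).sum := by
  rw [prefix_build]
  cases j with
  | zero => simp
  | succ t =>
    have ht : t < ws.length := by omega
    simp [List.getD, ht]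

lemma slice_sum (ws : List Int) (start k : Int) (hs : 0 ≤ start) (hk : 0 ≤ k) :
    (PySem.List.slice ws (some start) (some (start + k))).foldl (fun p i => p + i) 0
      = (ws.take ((start + k).toNat)).sum - (ws.take start.toNat).sum := by
  rw [PySem.List.slice_toNat ws hs (by omega)]
  have hfold : ∀ (l : List Int), l.foldl (fun p i => p + i) 0 = l.sum := by
    intro l; rw [List.sum_eq_foldl]
  obtain ⟨c, hc⟩ : ∃ c, (start + k).toNat = start.toNat + c :=
    ⟨(start + k).toNat - start.toNat, by omega⟩
  rw [hfold, hc, List.take_add, List.sum_append]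
  simp

lemma slice_dropLast (xs : List Int) :
    PySem.List.slice xs (some 0) (some ((xs.length : Int) - 1))
      = PySem.List.slice xs none (some (-1)) := by
  rw [PySem.List.slice_to_neg_one]
  cases xs with
  | nil => decide
  | cons x xs =>
    rw [PySem.List.slice_toNat _ (by omega) (by simp), List.dropLast_eq_take]
    congr 1
    simp

-- picked (A: sum of the k-slice at index start) = s (B: difference of two prefix sums)
lemma picked_eq_s (weights : List Int) (k start : Int) (hk : 1 ≤ k)
    (h0 : 0 ≤ start) (h1 : start < (weights.length : Int)) :
    List.foldl (fun picked i => picked + i) 0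
        (PySem.List.slice weights (some start) (some (start + k)))
      = PySem.List.pyGetD
          (List.foldl (fun pa w => (pa.1 ++ [pa.2 + w], pa.2 + w)) ([0], 0) weights).1
          (min (start + k) (weights.length : Int)) 0 -
        PySem.List.pyGetD
          (List.foldl (fun pa w => (pa.1 ++ [pa.2 + w], pa.2 + w)) ([0], 0) weights).1
          start 0 := by
  rw [slice_sum weights start k h0 (by omega),
    PySem.List.pyGetD_of_nonneg _ _ (by omega : (0:Int) ≤ min (start + k) (weights.length : Int)),
    PySem.List.pyGetD_of_nonneg _ _ h0,
    prefix_getD weights _ (by omega), prefix_getD weights _ (by omega)]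
  by_cases hle : start + k ≤ (weights.length : Int)
  · rw [min_eq_left hle]
  · rw [min_eq_right (by omega), List.take_of_length_le (by omega)]
    have h2 : ((weights.length : Int)).toNat = weights.length := by omega
    rw [h2, List.take_length]

-- the two inner loops compute the same (maximum, minimum) state
lemma inner_fold_eq (weights : List Int) (k : Int) (hk : 1 ≤ k) :
    List.foldl
      (fun (mm : Option Int × Option Int) index =>
        (some
            (match mm.1 with
            | none =>
              List.foldl (fun picked i => picked + i) 0
                (PySem.List.slice weights (some index) (some (index + k)))
            | some maximum =>
              max maximum
                (List.foldl (fun picked i => picked + i) 0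
                  (PySem.List.slice weights (some index) (some (index + k))))),
          some
            (match mm.2 with
            | none =>
              List.foldl (fun picked i => picked + i) 0
                (PySem.List.slice weights (some index) (some (index + k)))
            | some minimum =>
              min minimum
                (List.foldl (fun picked i => picked + i) 0
                  (PySem.List.slice weights (some index) (some (index + k)))))))
      (none, none) (PySem.List.pyRange 0 ((weights.length : Int)) k)
    = List.foldl
      (fun (hl : Option Int × Option Int) start =>
      (((match hl.1 with
        | some hi =>
          some
            (max hi
              (PySem.List.pyGetD (List.foldl (fun pa w => (pa.1 ++ [pa.2 + w], pa.2 + w)) ([0], 0) weights).1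
            (min (start + k) ((weights.length : Int))) 0 -
          PySem.List.pyGetD (List.foldl (fun pa w => (pa.1 ++ [pa.2 + w], pa.2 + w)) ([0], 0) weights).1
            start 0))
        | none =>
          some
            (PySem.List.pyGetD (List.foldl (fun pa w => (pa.1 ++ [pa.2 + w], pa.2 + w)) ([0], 0) weights).1
            (min (start + k) ((weights.length : Int))) 0 -
          PySem.List.pyGetD (List.foldl (fun pa w => (pa.1 ++ [pa.2 + w], pa.2 + w)) ([0], 0) weights).1
            start 0)),
        (match hl.2 with
        | some lo =>
          some
            (min lo
              (PySem.List.pyGetD (List.foldl (fun pa w => (pa.1 ++ [pa.2 + w], pa.2 + w)) ([0], 0) weights).1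
            (min (start + k) ((weights.length : Int))) 0 -
          PySem.List.pyGetD (List.foldl (fun pa w => (pa.1 ++ [pa.2 + w], pa.2 + w)) ([0], 0) weights).1
            start 0))
        | none =>
          some
            (PySem.List.pyGetD (List.foldl (fun pa w => (pa.1 ++ [pa.2 + w], pa.2 + w)) ([0], 0) weights).1
            (min (start + k) ((weights.length : Int))) 0 -
          PySem.List.pyGetD (List.foldl (fun pa w => (pa.1 ++ [pa.2 + w], pa.2 + w)) ([0], 0) weights).1
            start 0)))))
      (none, none) (PySem.List.pyRange 0 ((weights.length : Int)) k) := by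
  apply PySem.List.foldl_congr_mem
  intro mm start hmem
  rw [PySem.List.mem_pyRange_iff_of_pos (by omega)] at hmem
  obtain ⟨h0, h1, -⟩ := hmem
  rw [picked_eq_s weights k start hk h0 h1]
  rcases mm with ⟨m1, m2⟩
  cases m1 <;> cases m2 <;> rfl

-- B's hi/lo accumulator: none only together, and lo ≤ hi once both set
def InvHL (r : Option Int × Option Int) : Prop :=
  r = (none, none) ∨ ∃ M m, r = (some M, some m) ∧ m ≤ M

lemma inner_inv (weights : List Int) (k : Int) :
    ∀ (l : List Int) (init : Option Int × Option Int), InvHL init →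
    InvHL (List.foldl
      (fun (hl : Option Int × Option Int) start =>
      (((match hl.1 with
        | some hi =>
          some
            (max hi
              (PySem.List.pyGetD (List.foldl (fun pa w => (pa.1 ++ [pa.2 + w], pa.2 + w)) ([0], 0) weights).1
            (min (start + k) ((weights.length : Int))) 0 -
          PySem.List.pyGetD (List.foldl (fun pa w => (pa.1 ++ [pa.2 + w], pa.2 + w)) ([0], 0) weights).1
            start 0))
        | none =>
          some
            (PySem.List.pyGetD (List.foldl (fun pa w => (pa.1 ++ [pa.2 + w], pa.2 + w)) ([0], 0) weights).1
            (min (start + k) ((weights.length : Int))) 0 -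
          PySem.List.pyGetD (List.foldl (fun pa w => (pa.1 ++ [pa.2 + w], pa.2 + w)) ([0], 0) weights).1
            start 0)),
        (match hl.2 with
        | some lo =>
          some
            (min lo
              (PySem.List.pyGetD (List.foldl (fun pa w => (pa.1 ++ [pa.2 + w], pa.2 + w)) ([0], 0) weights).1
            (min (start + k) ((weights.length : Int))) 0 -
          PySem.List.pyGetD (List.foldl (fun pa w => (pa.1 ++ [pa.2 + w], pa.2 + w)) ([0], 0) weights).1
            start 0))
        | none =>
          some
            (PySem.List.pyGetD (List.foldl (fun pa w => (pa.1 ++ [pa.2 + w], pa.2 + w)) ([0], 0) weights).1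
            (min (start + k) ((weights.length : Int))) 0 -
          PySem.List.pyGetD (List.foldl (fun pa w => (pa.1 ++ [pa.2 + w], pa.2 + w)) ([0], 0) weights).1
            start 0)))))
      init l) := by
  intro l
  induction l with
  | nil => intro init h; exact h
  | cons x xs ih =>
    intro init h
    rw [List.foldl_cons]
    apply ih
    rcases h with h | ⟨M, m, hr, hm⟩
    · subst h
      exact Or.inr ⟨_, _, rfl, le_refl _⟩
    · subst hr
      exact Or.inr ⟨_, _, rfl, le_trans (min_le_left _ _) (le_trans hm (le_max_left _ _))⟩

lemma ports_eq (number : Int) (weights : List Int) :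
    makeBoxes number weights = makeBoxes_alt number weights := by
  simp only [makeBoxes, makeBoxes_alt, factors]
  rw [divsA_eq, bDivsAux_eq number (number.toNat + 1) 1 [] (by omega) (by omega),
    List.nil_append, slice_dropLast]
  apply PySem.List.foldl_congr_mem
  intro maxDiff k hkmem
  have hk1 : 1 ≤ k :=
    mem_divs_pos number k
      ((PySem.List.mem_sorted _ _ _ _).mp (PySem.List.mem_of_mem_slice _ _ _ hkmem))
  rw [inner_fold_eq weights k hk1]
  rcases inner_inv weights k (PySem.List.pyRange 0 ((weights.length : Int)) k) (none, none)
      (Or.inl rfl) with h | ⟨M, m, hr, hm⟩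
  · rw [h]
  · rw [hr]
    simp only
    rw [abs_of_nonneg (by omega)]

-- ===== VERDICT (by name: the statement is the Claim_ definition above) =====
theorem makeBoxes_spec : Claim_equal_makeBoxes := by
  intro number weights _ _
  unfold Spec_makeBoxes
  exact ports_eq number weights
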